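-- pv_equiv track=rewrite | github.com/sergioburbano05/Universitaria_de_colombia | PRUEBAS DE SOFTWARE/tareas/Prsf-taller -15/Juan Camilo Tautiva Moncada_539692_assignsubmission_file_/taller_s14.py | seleccionar_tests_optimos
-- ===== SOURCE A (Python) =====
-- def seleccionar_tests_optimos(tests, presupuesto):
--     """
--     Implementación Knapsack 0/1 para selección óptima de tests.
--     tests: [(nombre, tiempo, valor), ...]
--     presupuesto: tiempo máximo disponible (minutos)
--     Retorna (valor_total, lista_tests_seleccionados, tiempo_usado)
--     """
--     n = len(tests)
--
--     # Construir tabla DP [n+1][presupuesto+1]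
--     dp = [[0] * (presupuesto + 1) for _ in range(n + 1)]
--
--     for i in range(1, n + 1):
--         nombre, tiempo, valor = tests[i - 1]
--         for t in range(presupuesto + 1):
--             if tiempo > t:
--                 dp[i][t] = dp[i - 1][t]
--             else:
--                 dp[i][t] = max(dp[i - 1][t], dp[i - 1][t - tiempo] + valor)
--
--     # Reconstruir qué tests se seleccionaron
--     seleccionados = []
--     t = presupuesto
--     for i in range(n, 0, -1):
--         if dp[i][t] != dp[i - 1][t]:
--             seleccionados.append(tests[i - 1][0])
--             t -= tests[i - 1][1]
--
--     valor_total = dp[n][presupuesto]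
--     tiempo_usado = presupuesto - t
--
--     return valor_total, seleccionados, tiempo_usado
-- ===== SOURCE B (Python) =====
-- def seleccionar_tests_optimos(tests, presupuesto):
--     """Single-row DP over (valor, seleccionados, tiempo_usado) triples: one forward
--     pass, no full table and no backward reconstruction."""
--     fila = [(0, [], 0) for _ in range(presupuesto + 1)]
--     for nombre, tiempo, valor in tests:
--         nueva = []
--         for t in range(presupuesto + 1):
--             v0, s0, u0 = fila[t]
--             if tiempo > t:
--                 nueva.append((v0, s0, u0))
--             else:
--                 v1, s1, u1 = fila[t - tiempo]
--                 if v1 + valor > v0: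
--                     nueva.append((v1 + valor, [nombre] + s1, u1 + tiempo))
--                 else:
--                     nueva.append((v0, s0, u0))
--         fila = nueva
--     return fila[presupuesto]
-- ===== Notes on version B (the rewrite author's own statement) =====
-- stated objective: alternative
-- what changed: A builds the full (n+1)x(presupuesto+1) DP value table and then walks it backwards to reconstruct the chosen tests; B keeps a single DP row of (valor, seleccionados, tiempo_usado) triples updated once per item, so the answer is read off directly with no stored table and no reconstruction pass.
import Mathlib
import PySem

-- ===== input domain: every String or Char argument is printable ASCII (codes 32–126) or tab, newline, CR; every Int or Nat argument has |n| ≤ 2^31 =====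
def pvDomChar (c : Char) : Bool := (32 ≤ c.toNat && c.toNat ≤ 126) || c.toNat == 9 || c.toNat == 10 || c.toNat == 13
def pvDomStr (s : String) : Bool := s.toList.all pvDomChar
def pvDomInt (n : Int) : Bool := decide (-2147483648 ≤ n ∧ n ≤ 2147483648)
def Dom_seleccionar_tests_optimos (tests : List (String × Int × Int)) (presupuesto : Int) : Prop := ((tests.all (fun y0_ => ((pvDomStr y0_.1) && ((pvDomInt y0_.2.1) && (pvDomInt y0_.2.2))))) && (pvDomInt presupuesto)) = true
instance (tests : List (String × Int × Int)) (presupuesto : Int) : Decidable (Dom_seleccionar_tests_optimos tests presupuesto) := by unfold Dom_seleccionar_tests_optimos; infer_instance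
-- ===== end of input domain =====

-- B replaces A's full DP table + backward reconstruction by a single forward DP row of
-- (valor, seleccionados, tiempo_usado) triples (objective: alternative decomposition, same cost).

-- ===== PORT A =====
-- inner 'for t in range(presupuesto + 1)' body: dp[i][t] = … (in-range nonnegative indices only here)
def pvStepT (x : String × Int × Int) (i : Int) (dp : List (List Int)) (t : Int) : List (List Int) :=
  let v : Int :=
    if x.2.1 > t then PySem.List.pyGetD (PySem.List.pyGetD dp (i-1) []) t 0
    else max (PySem.List.pyGetD (PySem.List.pyGetD dp (i-1) []) t 0)
             (PySem.List.pyGetD (PySem.List.pyGetD dp (i-1) []) (t - x.2.1) 0 + x.2.2)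
  PySem.List.pySetD dp i (PySem.List.pySetD (PySem.List.pyGetD dp i []) t v)

-- outer 'for i in range(1, n + 1)' body
def pvStepI (tests : List (String × Int × Int)) (p : Int) (dp : List (List Int)) (i : Int) : List (List Int) :=
  (PySem.List.pyRange 0 (p+1) 1).foldl (pvStepT (PySem.List.pyGetD tests (i-1) ("", 0, 0)) i) dp

-- reconstruction 'for i in range(n, 0, -1)' body; state = (seleccionados, t)
def pvRecStep (dp : List (List Int)) (tests : List (String × Int × Int))
    (st : List String × Int) (i : Int) : List String × Int :=
  if PySem.List.pyGetD (PySem.List.pyGetD dp i []) st.2 0 ≠ PySem.List.pyGetD (PySem.List.pyGetD dp (i-1) []) st.2 0 then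
    (st.1 ++ [(PySem.List.pyGetD tests (i-1) ("", 0, 0)).1], st.2 - (PySem.List.pyGetD tests (i-1) ("", 0, 0)).2.1)
  else st

def seleccionar_tests_optimos (tests : List (String × Int × Int)) (presupuesto : Int) : Int × List String × Int :=
  let n : Int := (tests.length : Int)
  let dp : List (List Int) :=
    (PySem.List.pyRange 1 (n+1) 1).foldl (pvStepI tests presupuesto)
      ((PySem.List.pyRange 0 (n+1) 1).map (fun _ => PySem.List.pyRepeat [(0 : Int)] (presupuesto+1)))
  let fin := (PySem.List.pyRange n 0 (-1)).foldl (pvRecStep dp tests) ([], presupuesto)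
  (PySem.List.pyGetD (PySem.List.pyGetD dp n []) presupuesto 0, fin.1, presupuesto - fin.2)

-- ===== PORT B =====
-- inner 'for t in range(presupuesto + 1)' body building 'nueva'
def pvBStepT (fila : List (Int × List String × Int)) (x : String × Int × Int)
    (nueva : List (Int × List String × Int)) (t : Int) : List (Int × List String × Int) :=
  let p0 := PySem.List.pyGetD fila t (0, [], 0)
  if x.2.1 > t then nueva ++ [p0]
  else
    let p1 := PySem.List.pyGetD fila (t - x.2.1) (0, [], 0)
    if p1.1 + x.2.2 > p0.1 then nueva ++ [(p1.1 + x.2.2, x.1 :: p1.2.1, p1.2.2 + x.2.1)]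
    else nueva ++ [p0]

-- 'for nombre, tiempo, valor in tests' body: fila = nueva
def pvBStepX (p : Int) (fila : List (Int × List String × Int)) (x : String × Int × Int) :
    List (Int × List String × Int) :=
  (PySem.List.pyRange 0 (p+1) 1).foldl (pvBStepT fila x) []

def seleccionar_tests_optimos_alt (tests : List (String × Int × Int)) (presupuesto : Int) : Int × List String × Int :=
  let fila := tests.foldl (pvBStepX presupuesto)
    ((PySem.List.pyRange 0 (presupuesto+1) 1).map (fun _ => ((0 : Int), ([] : List String), (0 : Int))))
  PySem.List.pyGetD fila presupuesto (0, [], 0)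

-- ===== PRECONDITION & SPEC =====
-- Pre_ excludes exactly the inputs where the Python A raises IndexError: a negative
-- presupuesto, or any test with negative tiempo (B raises there too).
def Pre_seleccionar_tests_optimos (tests : List (String × Int × Int)) (presupuesto : Int) : Prop :=
  0 ≤ presupuesto ∧ ∀ x ∈ tests, 0 ≤ x.2.1
instance (tests : List (String × Int × Int)) (presupuesto : Int) : Decidable (Pre_seleccionar_tests_optimos tests presupuesto) := by unfold Pre_seleccionar_tests_optimos; infer_instance

def pvWitness_seleccionar_tests_optimos : (List (String × Int × Int)) × Int :=
  ([("a", 2, 3), ("b", 1, 2), ("c", 3, 4)], 3)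

def Spec_seleccionar_tests_optimos (tests : List (String × Int × Int)) (presupuesto : Int) (out : Int × List String × Int) : Prop := out = seleccionar_tests_optimos_alt tests presupuesto
instance (tests : List (String × Int × Int)) (presupuesto : Int) (out : Int × List String × Int) : Decidable (Spec_seleccionar_tests_optimos tests presupuesto out) := by unfold Spec_seleccionar_tests_optimos; infer_instance

-- ===== CLAIM (what is proved, stated in full; the proofs are below) =====
def Claim_equal_seleccionar_tests_optimos : Prop := ∀ (tests : List (String × Int × Int)) (presupuesto : Int), Dom_seleccionar_tests_optimos tests presupuesto → Pre_seleccionar_tests_optimos tests presupuesto → Spec_seleccionar_tests_optimos tests presupuesto (seleccionar_tests_optimos tests presupuesto)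

-- ===== LEMMAS AND PROOFS =====

-- the common recursion both programs implement: over the REVERSED processed prefix,
-- (best value, chosen names in decreasing-index order, time used), skip-on-tie
def pvS : List (String × Int × Int) → Int → Int × List String × Int
  | [], _ => (0, [], 0)
  | x :: rest, t =>
    let p0 := pvS rest t
    if x.2.1 > t then p0
    else
      let p1 := pvS rest (t - x.2.1)
      if p1.1 + x.2.2 > p0.1 then (p1.1 + x.2.2, x.1 :: p1.2.1, p1.2.2 + x.2.1) else p0

lemma A_inner_aux (p : Int) (x : String × Int × Int) (hx : 0 ≤ x.2.1)
    (i : Int) (dp : List (List Int)) (hi : 0 < i) (hilen : i < (dp.length : Int))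
    (g : Int → Int)
    (hprev : PySem.List.pyGetD dp (i-1) [] = (PySem.List.pyRange 0 (p+1) 1).map g)
    (hlen : (PySem.List.pyGetD dp i []).length = (p+1).toNat)
    (m : Nat) (hm : (m : Int) ≤ p + 1) :
    (PySem.List.pyRange 0 (m : Int) 1).foldl (pvStepT x i) dp
    = PySem.List.pySetD dp i
        (((PySem.List.pyRange 0 (m : Int) 1).map (fun t => if x.2.1 > t then g t else max (g t) (g (t - x.2.1) + x.2.2)))
         ++ (PySem.List.pyGetD dp i []).drop m) := by
  have hi0 : (0:Int) ≤ i := le_of_lt hi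
  have hgetd : PySem.List.pyGetD dp i [] = dp[i.toNat]'(by omega) :=
    PySem.List.pyGetD_eq_getElem _ _ hi0 hilen
  induction m with
  | zero =>
    rw [show ((0:Nat):Int) = 0 from rfl, PySem.List.pyRange_one_eq_nil le_rfl]
    simp only [List.foldl_nil, List.map_nil, List.nil_append, List.drop_zero]
    rw [PySem.List.pySetD_of_nonneg _ _ hi0, hgetd, List.set_getElem_self (by omega)]
  | succ m ih =>
    have hm' : (m : Int) ≤ p + 1 := by push_cast at hm ⊢; omega
    have hrange : PySem.List.pyRange 0 ((m+1:Nat):Int) 1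
        = PySem.List.pyRange 0 (m:Int) 1 ++ [(m:Int)] := by
      rw [show ((m+1:Nat):Int) = (m:Int)+1 by push_cast; ring]
      exact PySem.List.pyRange_one_succ_right (by positivity)
    rw [hrange, List.foldl_append, ih hm' hgetd, List.foldl_cons, List.foldl_nil]
    set f : Int → Int := fun t => if x.2.1 > t then g t else max (g t) (g (t - x.2.1) + x.2.2) with hf
    set P : List Int := ((PySem.List.pyRange 0 (m:Int) 1).map f) ++ (PySem.List.pyGetD dp i []).drop m with hP
    have hsetnn := PySem.List.pySetD_of_nonneg dp P hi0
    have hlen' : dp.length = (PySem.List.pySetD dp i P).length := by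
      rw [hsetnn]; simp
    -- row i-1 of the updated table is unchanged
    have hprev' : PySem.List.pyGetD (PySem.List.pySetD dp i P) (i-1) []
        = (PySem.List.pyRange 0 (p+1) 1).map g := by
      rw [hsetnn, PySem.List.pyGetD_eq_getElem _ _ (by omega) (by simp [List.length_set, hsetnn]; omega),
          List.getElem_set_ne (by omega) (by simp [List.length_set, hsetnn]; omega), ← hprev,
          PySem.List.pyGetD_eq_getElem _ _ (by omega) (by omega)]
    -- row i of the updated table is P
    have hcur : PySem.List.pyGetD (PySem.List.pySetD dp i P) i [] = P := by
      rw [hsetnn, PySem.List.pyGetD_eq_getElem _ _ (by omega) (by simp [List.length_set, hsetnn]; omega),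
          List.getElem_set_self (by simp [List.length_set]; omega)]
    have hmlt : m < (PySem.List.pyGetD dp i []).length := by omega
    have hmaplen : ((PySem.List.pyRange 0 (m:Int) 1).map f).length = m := by
      simp [PySem.List.length_pyRange_one]
    -- the value written at position m is f m
    have hv : (if x.2.1 > (m:Int) then PySem.List.pyGetD (PySem.List.pyGetD (PySem.List.pySetD dp i P) (i-1) []) (m:Int) 0
        else max (PySem.List.pyGetD (PySem.List.pyGetD (PySem.List.pySetD dp i P) (i-1) []) (m:Int) 0)
                 (PySem.List.pyGetD (PySem.List.pyGetD (PySem.List.pySetD dp i P) (i-1) []) ((m:Int) - x.2.1) 0 + x.2.2))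
        = f (m:Int) := by
      rw [hprev']
      simp only [hf]
      by_cases hc : x.2.1 > (m:Int)
      · simp only [if_pos hc]
        exact PySem.List.pyGetD_map_pyRange_of_nonneg _ _ _ _ (by positivity) (by omega)
      · simp only [if_neg hc]
        rw [PySem.List.pyGetD_map_pyRange_of_nonneg _ _ _ _ (by positivity) (by omega),
            PySem.List.pyGetD_map_pyRange_of_nonneg _ _ _ _ (by omega) (by omega)]
    show pvStepT x i (PySem.List.pySetD dp i P) (m:Int) = _
    unfold pvStepT
    simp only [hv, hcur]
    -- writing f m at slot m extends the rewritten prefix by one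
    have hsetP : PySem.List.pySetD P (m:Int) (f (m:Int))
        = ((PySem.List.pyRange 0 ((m+1:Nat):Int) 1).map f) ++ (PySem.List.pyGetD dp i []).drop (m+1) := by
      rw [PySem.List.pySetD_of_nonneg _ _ (by positivity), hP,
          show ((m:Int)).toNat = m from Int.toNat_natCast m,
          List.set_append_right _ _ (by omega), hmaplen,
          Nat.sub_self,
          List.drop_eq_getElem_cons hmlt, List.set_cons_zero, hrange, List.map_append]
      simp
    rw [hsetP, PySem.List.pySetD_of_nonneg _ _ hi0, PySem.List.pySetD_of_nonneg _ _ hi0, List.set_set,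
        PySem.List.pySetD_of_nonneg _ _ hi0, hrange]

lemma A_inner (p : Int) (hp : 0 ≤ p) (x : String × Int × Int) (hx : 0 ≤ x.2.1)
    (i : Int) (dp : List (List Int)) (hi : 0 < i) (hilen : i < (dp.length : Int))
    (g : Int → Int)
    (hprev : PySem.List.pyGetD dp (i-1) [] = (PySem.List.pyRange 0 (p+1) 1).map g)
    (hlen : (PySem.List.pyGetD dp i []).length = (p+1).toNat) :
    (PySem.List.pyRange 0 (p+1) 1).foldl (pvStepT x i) dp
    = PySem.List.pySetD dp i ((PySem.List.pyRange 0 (p+1) 1).map (fun t =>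
        if x.2.1 > t then g t else max (g t) (g (t - x.2.1) + x.2.2))) := by
  have h := A_inner_aux p x hx i dp hi hilen g hprev hlen (p+1).toNat (by omega)
  rw [show (((p+1).toNat : Int)) = p + 1 from Int.toNat_of_nonneg (by omega)] at h
  rw [h, ← hlen, List.drop_length, List.append_nil]


lemma pvS_fst (x : String × Int × Int) (l : List (String × Int × Int)) (t : Int) :
    (pvS (x :: l) t).1 =
      if x.2.1 > t then (pvS l t).1 else max ((pvS l t).1) ((pvS l (t - x.2.1)).1 + x.2.2) := by
  simp only [pvS]
  split_ifs with h1 h2 <;> simp_all <;> omega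

def pvTab (tests : List (String × Int × Int)) (p : Int) (k : Nat) : List (List Int) :=
  (PySem.List.pyRange 0 ((tests.length : Int)+1) 1).map (fun i =>
    (PySem.List.pyRange 0 (p+1) 1).map (fun t =>
      (pvS ((tests.take (if i ≤ (k : Int) then i.toNat else 0)).reverse) t).1))

lemma pvTab_row (tests : List (String × Int × Int)) (p : Int) (k : Nat) (i : Int)
    (h0 : 0 ≤ i) (h1 : i ≤ (tests.length : Int)) :
    PySem.List.pyGetD (pvTab tests p k) i []
    = (PySem.List.pyRange 0 (p+1) 1).map (fun t =>
        (pvS ((tests.take (if i ≤ (k : Int) then i.toNat else 0)).reverse) t).1) := by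
  unfold pvTab
  exact PySem.List.pyGetD_map_pyRange_of_nonneg _ _ _ _ h0 (by omega)

lemma take_rev_succ (tests : List (String × Int × Int)) (k : Nat) (hk : k < tests.length) :
    (tests.take (k+1)).reverse = tests[k] :: (tests.take k).reverse := by
  rw [List.take_add_one, List.getElem?_eq_getElem hk]
  simp

lemma A_outer (tests : List (String × Int × Int)) (p : Int) (hp : 0 ≤ p)
    (hτ : ∀ x ∈ tests, 0 ≤ x.2.1) (k : Nat) (hk : k ≤ tests.length) :
    (PySem.List.pyRange 1 ((k : Int)+1) 1).foldl (pvStepI tests p) (pvTab tests p 0)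
    = pvTab tests p k := by
  induction k with
  | zero =>
    rw [show ((0:Nat):Int)+1 = 1 by norm_num, PySem.List.pyRange_one_eq_nil le_rfl, List.foldl_nil]
  | succ k ih =>
    have hk' : k ≤ tests.length := by omega
    have hklt : k < tests.length := by omega
    rw [show ((k+1:Nat):Int)+1 = ((k:Int)+1)+1 by push_cast; ring,
        PySem.List.pyRange_one_succ_right (by omega), List.foldl_append, ih hk',
        List.foldl_cons, List.foldl_nil]
    unfold pvStepI
    have hx : PySem.List.pyGetD tests ((k:Int)+1-1) ("", 0, 0) = tests[k] := by
      rw [show (k:Int)+1-1 = (k:Int) by ring,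
          PySem.List.pyGetD_eq_getElem _ _ (by positivity) (by omega)]
      simp
    rw [hx]
    have hrow : PySem.List.pyGetD (pvTab tests p k) ((k:Int)+1-1) []
        = (PySem.List.pyRange 0 (p+1) 1).map (fun t => (pvS ((tests.take k).reverse) t).1) := by
      rw [show (k:Int)+1-1 = (k:Int) by ring, pvTab_row tests p k (k:Int) (by positivity) (by omega)]
      simp
    have hlenrow : (PySem.List.pyGetD (pvTab tests p k) ((k:Int)+1) []).length = (p+1).toNat := by
      rw [pvTab_row tests p k ((k:Int)+1) (by positivity) (by omega)]
      simp [PySem.List.length_pyRange_one]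
    rw [A_inner p hp tests[k] (hτ _ (List.getElem_mem hklt)) ((k:Int)+1) (pvTab tests p k)
          (by positivity) (by simp [pvTab, PySem.List.length_pyRange_one]; omega) _ hrow hlenrow]
    -- the written row is the true row for prefix k+1
    have hbody : ∀ t : Int, (if tests[k].2.1 > t then (pvS ((tests.take k).reverse) t).1
        else max ((pvS ((tests.take k).reverse) t).1) ((pvS ((tests.take k).reverse) (t - tests[k].2.1)).1 + tests[k].2.2))
        = (pvS ((tests.take (k+1)).reverse) t).1 := by
      intro t
      rw [take_rev_succ tests k hklt, pvS_fst]
    rw [PySem.List.pySetD_of_nonneg _ _ (by positivity),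
        show (((k:Int)+1)).toNat = k+1 by omega]
    have hTlen : ∀ k' : Nat, (pvTab tests p k').length = ((tests.length:Int)+1).toNat := by
      intro k'; simp [pvTab, PySem.List.length_pyRange_one]
    apply List.ext_getElem
    · simp [pvTab, PySem.List.length_pyRange_one]
    · intro j hj1 hj2
      have hjlen : j < ((tests.length : Int)+1).toNat := by
        simpa [pvTab, PySem.List.length_pyRange_one] using hj2
      have hget : ∀ (k' : Nat), (pvTab tests p k')[j]'(by simp [pvTab, PySem.List.length_pyRange_one]; omega)
          = (PySem.List.pyRange 0 (p+1) 1).map (fun t =>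
              (pvS ((tests.take (if (j:Int) ≤ (k' : Int) then (j:Int).toNat else 0)).reverse) t).1) := by
        intro k'
        simp only [pvTab, List.getElem_map, PySem.List.getElem_pyRange_one]
        norm_num
      by_cases hj : j = k+1
      · subst hj
        rw [List.getElem_set_self (by simp only [List.length_set, hTlen]; omega), hget (k+1)]
        apply List.map_congr_left
        intro t _
        rw [if_pos le_rfl, Int.toNat_natCast]
        exact (hbody t)
      · rw [List.getElem_set_ne (by omega) (by simp only [List.length_set, hTlen]; omega),
            hget k, hget (k+1)]
        have hiff : (j:Int) ≤ (k:Int) ↔ (j:Int) ≤ ((k+1:Nat):Int) := by push_cast; omega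
        simp only [hiff]

lemma pvTab_get (tests : List (String × Int × Int)) (p : Int) (i t : Int)
    (hi0 : 0 ≤ i) (hin : i ≤ (tests.length : Int)) (ht0 : 0 ≤ t) (htp : t ≤ p) :
    PySem.List.pyGetD (PySem.List.pyGetD (pvTab tests p tests.length) i []) t 0
    = (pvS ((tests.take i.toNat).reverse) t).1 := by
  rw [pvTab_row tests p tests.length i hi0 hin, if_pos hin]
  exact PySem.List.pyGetD_map_pyRange_of_nonneg _ _ _ _ ht0 (by omega)

lemma A_recon (tests : List (String × Int × Int)) (p : Int) (hp : 0 ≤ p)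
    (hτ : ∀ x ∈ tests, 0 ≤ x.2.1) (k : Nat) (hk : k ≤ tests.length)
    (sel : List String) (t : Int) (ht0 : 0 ≤ t) (htp : t ≤ p) :
    (PySem.List.pyRange (k : Int) 0 (-1)).foldl (pvRecStep (pvTab tests p tests.length) tests) (sel, t)
    = (sel ++ (pvS ((tests.take k).reverse) t).2.1, t - (pvS ((tests.take k).reverse) t).2.2) := by
  induction k generalizing sel t with
  | zero =>
    rw [show ((0:Nat):Int) = 0 from rfl, PySem.List.pyRange_neg_one_eq_nil le_rfl, List.foldl_nil]
    simp [pvS]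
  | succ k ih =>
    have hklt : k < tests.length := by omega
    have hxm : tests[k] ∈ tests := List.getElem_mem hklt
    have hτk : 0 ≤ tests[k].2.1 := hτ _ hxm
    rw [show ((k+1:Nat):Int) = (k:Int)+1 by push_cast; ring,
        PySem.List.pyRange_neg_one_cons (by positivity), List.foldl_cons,
        show (k:Int)+1-1 = (k:Int) by ring]
    have hxg : PySem.List.pyGetD tests ((k:Int)+1-1) ("", 0, 0) = tests[k] := by
      rw [show (k:Int)+1-1 = (k:Int) by ring,
          PySem.List.pyGetD_eq_getElem _ _ (by positivity) (by omega)]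
      simp
    have hg1 : PySem.List.pyGetD (PySem.List.pyGetD (pvTab tests p tests.length) ((k:Int)+1) []) t 0
        = (pvS (tests[k] :: (tests.take k).reverse) t).1 := by
      rw [pvTab_get tests p ((k:Int)+1) t (by positivity) (by omega) ht0 htp,
          show (((k:Int)+1)).toNat = k+1 by omega, take_rev_succ tests k hklt]
    have hg0 : PySem.List.pyGetD (PySem.List.pyGetD (pvTab tests p tests.length) ((k:Int)+1-1) []) t 0
        = (pvS ((tests.take k).reverse) t).1 := by
      rw [show (k:Int)+1-1 = (k:Int) by ring,
          pvTab_get tests p (k:Int) t (by positivity) (by omega) ht0 htp, Int.toNat_natCast]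
    set x := tests[k] with hxdef
    set l := (tests.take k).reverse with hldef
    have hrw : (tests.take (k+1)).reverse = x :: l := take_rev_succ tests k hklt
    rw [hrw]
    by_cases hc : x.2.1 > t
    · have heq : (pvS (x :: l) t).1 = (pvS l t).1 := by rw [pvS_fst, if_pos hc]
      have hone : pvRecStep (pvTab tests p tests.length) tests (sel, t) ((k:Int)+1) = (sel, t) := by
        unfold pvRecStep
        rw [if_neg (by simp only [hg1, hg0]; simp [heq])]
      rw [hone, ih (by omega) sel t ht0 htp]
      have hv : pvS (x :: l) t = pvS l t := by simp only [pvS]; rw [if_pos hc]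
      rw [hv]
    · by_cases himp : (pvS l (t - x.2.1)).1 + x.2.2 > (pvS l t).1
      · have hne : (pvS (x :: l) t).1 ≠ (pvS l t).1 := by
          rw [pvS_fst, if_neg hc]; omega
        have hone : pvRecStep (pvTab tests p tests.length) tests (sel, t) ((k:Int)+1)
            = (sel ++ [x.1], t - x.2.1) := by
          unfold pvRecStep
          rw [if_pos (by simp only [hg1, hg0]; simpa using hne), hxg]
        rw [hone, ih (by omega) (sel ++ [x.1]) (t - x.2.1) (by omega) (by omega)]
        have hv : pvS (x :: l) t = ((pvS l (t - x.2.1)).1 + x.2.2, x.1 :: (pvS l (t - x.2.1)).2.1,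
            (pvS l (t - x.2.1)).2.2 + x.2.1) := by
          simp only [pvS]; rw [if_neg hc, if_pos himp]
        rw [hv]
        simp only [Prod.mk.injEq]
        refine ⟨by simp, by omega⟩
      · have heq : (pvS (x :: l) t).1 = (pvS l t).1 := by
          rw [pvS_fst, if_neg hc]; omega
        have hone : pvRecStep (pvTab tests p tests.length) tests (sel, t) ((k:Int)+1) = (sel, t) := by
          unfold pvRecStep
          rw [if_neg (by simp only [hg1, hg0]; simp [heq])]
        rw [hone, ih (by omega) sel t ht0 htp]
        have hv : pvS (x :: l) t = pvS l t := by
          simp only [pvS]; rw [if_neg hc, if_neg himp]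
        rw [hv]

lemma B_step (p : Int) (hp : 0 ≤ p) (x : String × Int × Int) (hx : 0 ≤ x.2.1)
    (l : List (String × Int × Int)) :
    pvBStepX p ((PySem.List.pyRange 0 (p+1) 1).map (fun t => pvS l t)) x
    = (PySem.List.pyRange 0 (p+1) 1).map (fun t => pvS (x :: l) t) := by
  unfold pvBStepX
  have hfun : pvBStepT ((PySem.List.pyRange 0 (p+1) 1).map (fun t => pvS l t)) x
      = fun nueva t => nueva ++ pvBStepT ((PySem.List.pyRange 0 (p+1) 1).map (fun t => pvS l t)) x [] t := by
    funext nueva t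
    simp only [pvBStepT]
    split_ifs <;> simp
  rw [hfun, PySem.List.foldl_append_eq_flatMap, List.nil_append]
  conv_rhs => rw [List.map_eq_flatMap]
  apply List.flatMap_congr
  intro t ht
  rw [PySem.List.mem_pyRange_one] at ht
  have h1 : PySem.List.pyGetD ((PySem.List.pyRange 0 (p+1) 1).map (fun t => pvS l t)) t (0, [], 0) = pvS l t :=
    PySem.List.pyGetD_map_pyRange_of_nonneg _ _ _ _ ht.1 ht.2
  simp only [pvBStepT, pvS, h1]
  by_cases hc : x.2.1 > t
  · simp [hc]
  · have h2 : PySem.List.pyGetD ((PySem.List.pyRange 0 (p+1) 1).map (fun t => pvS l t)) (t - x.2.1) (0, [], 0) = pvS l (t - x.2.1) :=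
      PySem.List.pyGetD_map_pyRange_of_nonneg _ _ _ _ (by omega) (by omega)
    simp only [h2, if_neg hc]
    split_ifs <;> simp

lemma B_fold (p : Int) (hp : 0 ≤ p) (xs l : List (String × Int × Int))
    (hxs : ∀ x ∈ xs, 0 ≤ x.2.1) :
    xs.foldl (pvBStepX p) ((PySem.List.pyRange 0 (p+1) 1).map (fun t => pvS l t))
    = (PySem.List.pyRange 0 (p+1) 1).map (fun t => pvS (xs.reverse ++ l) t) := by
  induction xs generalizing l with
  | nil => simp
  | cons x xs ih =>
    rw [List.foldl_cons, B_step p hp x (hxs x (by simp)) l,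
        ih (x :: l) (fun y hy => hxs y (by simp [hy]))]
    simp


-- ===== VERDICT (by name: the statement is the Claim_ definition above) =====
theorem seleccionar_tests_optimos_spec : Claim_equal_seleccionar_tests_optimos := by
  intro tests p _hdom hpre
  obtain ⟨hp, hτ⟩ := hpre
  unfold Spec_seleccionar_tests_optimos
  simp only [seleccionar_tests_optimos, seleccionar_tests_optimos_alt]
  have hdp0 : ((PySem.List.pyRange 0 ((tests.length : Int)+1) 1).map
      (fun _ => PySem.List.pyRepeat [(0 : Int)] (p+1))) = pvTab tests p 0 := by
    unfold pvTab
    apply List.map_congr_left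
    intro i hi
    rw [PySem.List.mem_pyRange_one] at hi
    rw [PySem.List.pyRepeat_singleton]
    have hcond : (if i ≤ ((0:Nat) : Int) then i.toNat else 0) = 0 := by
      split_ifs <;> omega
    rw [hcond]
    simp [pvS, PySem.List.length_pyRange_one, List.map_const']
  rw [hdp0, A_outer tests p hp hτ tests.length le_rfl]
  rw [pvTab_get tests p (tests.length : Int) p (by positivity) le_rfl hp le_rfl,
      Int.toNat_natCast, List.take_length]
  rw [A_recon tests p hp hτ tests.length le_rfl [] p hp le_rfl, List.take_length]
  rw [show ((PySem.List.pyRange 0 (p+1) 1).map (fun _ => ((0:Int), ([]:List String), (0:Int))))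
      = (PySem.List.pyRange 0 (p+1) 1).map (fun t => pvS [] t) from rfl,
      B_fold p hp tests [] hτ, List.append_nil,
      PySem.List.pyGetD_map_pyRange_of_nonneg _ _ _ _ hp (by omega)]
  simp only [List.nil_append]
  rw [show p - (p - (pvS tests.reverse p).2.2) = (pvS tests.reverse p).2.2 by ring]
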